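-- pv_equiv track=rewrite | github.com/sascha-hemi/waste-collection-ammerland | main.py | get_ast
-- ===== SOURCE A (Python) =====
-- def get_ast(parts, street_id, strgrid):
--     """Return the ast area code for Kal2 lookup."""
--     entry = next(
--         (e for e in parts[4] if e["strid"] == street_id and e["astgrid"] == strgrid),
--         None,
--     )
--     if entry is None and strgrid != 0:
--         entry = next(
--             (e for e in parts[4] if e["strid"] == street_id and e["astgrid"] == 0),
--             None,
--         )
--     return entry["ast"] if entry else None
-- ===== SOURCE B (Python) =====
-- def get_ast(parts, street_id, strgrid):
--     """Return the ast area code for Kal2 lookup."""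
--     fallback = None
--     for e in parts[4]:
--         if e["strid"] == street_id:
--             g = e["astgrid"]
--             if g == strgrid:
--                 return e["ast"]
--             if g == 0 and fallback is None:
--                 fallback = e
--     if strgrid != 0 and fallback is not None:
--         return fallback["ast"]
--     return None
-- ===== Notes on version B (the rewrite author's own statement) =====
-- stated objective: simpler
-- what changed: Replaces A's two separate generator scans (one for the exact astgrid match, then a whole second pass for the astgrid==0 fallback) by a single traversal that returns immediately on the first exact match and tracks the first fallback entry as it goes.
import Mathlib
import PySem

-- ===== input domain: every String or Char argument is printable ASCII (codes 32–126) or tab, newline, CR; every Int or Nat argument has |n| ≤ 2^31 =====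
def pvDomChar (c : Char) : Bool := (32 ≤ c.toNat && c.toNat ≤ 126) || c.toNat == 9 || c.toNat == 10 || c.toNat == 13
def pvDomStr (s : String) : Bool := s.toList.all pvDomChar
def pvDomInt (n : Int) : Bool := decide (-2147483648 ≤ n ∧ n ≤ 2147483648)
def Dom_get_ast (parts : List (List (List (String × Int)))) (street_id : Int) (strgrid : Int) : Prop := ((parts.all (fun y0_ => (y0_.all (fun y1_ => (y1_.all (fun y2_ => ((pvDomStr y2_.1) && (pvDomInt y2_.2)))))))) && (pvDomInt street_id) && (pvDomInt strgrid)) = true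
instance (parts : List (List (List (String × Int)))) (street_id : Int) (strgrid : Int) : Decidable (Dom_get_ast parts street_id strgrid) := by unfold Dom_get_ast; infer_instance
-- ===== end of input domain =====

-- B does the lookup in ONE pass over parts[4] — returning on the first exact astgrid match and tracking
-- the first astgrid==0 fallback as it goes — instead of A's two separate generator scans.

-- shared primitive: Python's e[k] on an association-list dict (first match; none = KeyError)
def pvLookup (e : List (String × Int)) (k : String) : Option Int :=
  (e.find? (fun p => p.1 == k)).map (·.2)

-- ===== PORT A =====
def get_ast (parts : List (List (List (String × Int)))) (street_id : Int) (strgrid : Int) : Option Int :=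
  match PySem.List.pyGet? parts 4 with
  | none => none                      -- IndexError (excluded by Pre_)
  | some p4 =>
    -- entry = next((e for e in parts[4] if e["strid"] == street_id and e["astgrid"] == strgrid), None)
    let entry := p4.find? (fun e => pvLookup e "strid" == some street_id && pvLookup e "astgrid" == some strgrid)
    -- if entry is None and strgrid != 0: second scan with astgrid == 0
    let entry := match entry with
      | none =>
        if strgrid ≠ 0 then
          p4.find? (fun e => pvLookup e "strid" == some street_id && pvLookup e "astgrid" == some 0)
        else none
      | some e => some e
    -- return entry["ast"] if entry else None
    match entry with
    | some e => pvLookup e "ast"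
    | none => none

-- ===== PORT B =====
-- Source B's loop (early return on the exact match, `fallback` accumulator); the [] case is the code after the loop
def pvScan (street_id strgrid : Int) (l : List (List (String × Int)))
    (fallback : Option (List (String × Int))) : Option Int :=
  match l with
  | [] =>
    if strgrid ≠ 0 then
      match fallback with
      | some e => pvLookup e "ast"
      | none => none
    else none
  | e :: t =>
    if pvLookup e "strid" == some street_id then
      let g := pvLookup e "astgrid"
      if g == some strgrid then pvLookup e "ast"
      else if g == some 0 && fallback.isNone then pvScan street_id strgrid t (some e)
      else pvScan street_id strgrid t fallback
    else pvScan street_id strgrid t fallback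

def get_ast_alt (parts : List (List (List (String × Int)))) (street_id : Int) (strgrid : Int) : Option Int :=
  match PySem.List.pyGet? parts 4 with
  | none => none
  | some p4 => pvScan street_id strgrid p4 none

-- ===== PRECONDITION & SPEC =====
-- Pre_ is exactly A's (and B's) no-raise set: parts[4] exists (else IndexError), every entry scanned
-- before the first exact match carries "strid" (and, when its strid matches, "astgrid") (else KeyError),
-- and the entry whose "ast" is read — the exact match, or the astgrid==0 fallback when strgrid ≠ 0 and
-- there is no exact match — carries "ast".
def Pre_get_ast (parts : List (List (List (String × Int)))) (street_id : Int) (strgrid : Int) : Prop :=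
  (PySem.List.pyGet? parts 4).isSome ∧
  (∀ e ∈ ((PySem.List.pyGet? parts 4).getD []).takeWhile
      (fun e => !(pvLookup e "strid" == some street_id && pvLookup e "astgrid" == some strgrid)),
    (pvLookup e "strid").isSome ∧
      (pvLookup e "strid" = some street_id → (pvLookup e "astgrid").isSome)) ∧
  (∀ e ∈ ((PySem.List.pyGet? parts 4).getD []).find?
      (fun e => pvLookup e "strid" == some street_id && pvLookup e "astgrid" == some strgrid),
    (pvLookup e "ast").isSome) ∧
  ((((PySem.List.pyGet? parts 4).getD []).find?
      (fun e => pvLookup e "strid" == some street_id && pvLookup e "astgrid" == some strgrid) = none ∧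
      strgrid ≠ 0) →
    ∀ e ∈ ((PySem.List.pyGet? parts 4).getD []).find?
        (fun e => pvLookup e "strid" == some street_id && pvLookup e "astgrid" == some 0),
      (pvLookup e "ast").isSome)

instance (parts : List (List (List (String × Int)))) (street_id : Int) (strgrid : Int) : Decidable (Pre_get_ast parts street_id strgrid) := by unfold Pre_get_ast; infer_instance

def pvWitness_get_ast : (List (List (List (String × Int)))) × Int × Int :=
  ([[], [], [], [], [[("strid", 1), ("astgrid", 0), ("ast", 7)]]], 1, 2)

def Spec_get_ast (parts : List (List (List (String × Int)))) (street_id : Int) (strgrid : Int) (out : Option Int) : Prop := out = get_ast_alt parts street_id strgrid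
instance (parts : List (List (List (String × Int)))) (street_id : Int) (strgrid : Int) (out : Option Int) : Decidable (Spec_get_ast parts street_id strgrid out) := by unfold Spec_get_ast; infer_instance

-- ===== CLAIM (what is proved, stated in full; the proofs are below) =====
def Claim_equal_get_ast : Prop := ∀ (parts : List (List (List (String × Int)))) (street_id : Int) (strgrid : Int), Dom_get_ast parts street_id strgrid → Pre_get_ast parts street_id strgrid → Spec_get_ast parts street_id strgrid (get_ast parts street_id strgrid)

-- ===== LEMMAS AND PROOFS =====

-- B's single scan, characterised by A's two find? passes (fallback generalises the accumulator)
theorem pvScan_eq (street_id strgrid : Int) (l : List (List (String × Int)))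
    (fb : Option (List (String × Int))) :
    pvScan street_id strgrid l fb =
      match l.find? (fun e => pvLookup e "strid" == some street_id && pvLookup e "astgrid" == some strgrid) with
      | some e => pvLookup e "ast"
      | none =>
        if strgrid ≠ 0 then
          match fb.or (l.find? (fun e => pvLookup e "strid" == some street_id && pvLookup e "astgrid" == some 0)) with
          | some e => pvLookup e "ast"
          | none => none
        else none := by
  induction l generalizing fb with
  | nil => simp [pvScan]
  | cons h t ih =>
    by_cases hs : (pvLookup h "strid" == some street_id) = true
    · by_cases hg : (pvLookup h "astgrid" == some strgrid) = true
      · simp [pvScan, List.find?, hs, hg]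
      · by_cases h0 : (pvLookup h "astgrid" == some 0) = true
        · cases fb with
          | none => simp [pvScan, List.find?, hs, hg, h0, ih, Option.or]
          | some b => simp [pvScan, List.find?, hs, hg, h0, ih, Option.or]
        · simp [pvScan, List.find?, hs, hg, h0, ih]
    · simp [pvScan, List.find?, hs, ih]

-- ===== VERDICT (by name: the statement is the Claim_ definition above) =====
theorem get_ast_spec : Claim_equal_get_ast := by
  intro parts street_id strgrid _ _
  unfold Spec_get_ast get_ast get_ast_alt
  cases hp : PySem.List.pyGet? parts 4 with
  | none => rfl
  | some p4 =>
    simp only [pvScan_eq]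
    cases hfind : p4.find? (fun e => pvLookup e "strid" == some street_id && pvLookup e "astgrid" == some strgrid) with
    | some e => rfl
    | none =>
      by_cases hsg : strgrid ≠ 0
      · simp [hsg, Option.or]
      · simp [hsg]
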